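-- pv_equiv track=rewrite | github.com/dblyon/agotool | app/python/create_SQL_tables_snakemake.py | helper_parse_UniProt_dump_other_functions
-- ===== SOURCE A (Python) =====
-- def helper_parse_UniProt_dump_other_functions(list_of_string):
--     """
--     e.g. input
--     [['EMBL; AY548484; AAT09660.1; -; Genomic_DNA.'],
--      ['RefSeq; YP_031579.1; NC_005946.1.'],
--      ['ProteinModelPortal; Q6GZX4; -.'],
--      ['SwissPalm; Q6GZX4; -.'],
--      ['GeneID; 2947773; -.'],
--      ['KEGG; vg:2947773; -.'],
--      ['Proteomes; UP000008770; Genome.'],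
--      ['GO; GO:0046782; P:regulation of viral transcription; IEA:InterPro.'],
--      ['InterPro; IPR007031; Poxvirus_VLTF3.'],
--      ['Pfam; PF04947; Pox_VLTF3; 1.']]
--      EnsemblPlants; AT3G09880.1; AT3G09880.1; AT3G09880.
--     """
--     # GO, InterPro, Pfam, KEGG, Reactome, STRING, Proteomes = [], [], [], [], [], [], []
--     GO, InterPro, Pfam, Reactome = [], [], [], []
--     for row in list_of_string:
--         row_split = row.split(";")
--         func_type = row_split[0]
--         try:
--             annotation = row_split[1].strip()
--         except IndexError:
--             continue
--         # if func_type == "KEGG":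
--         #     KEGG.append(annotation)
--         if func_type == "GO":
--             GO.append(annotation)
--         elif func_type == "InterPro":
--             InterPro.append(annotation)
--         elif func_type == "Pfam":
--             Pfam.append(annotation)
--         elif func_type == "Reactome":        # DR   Reactome; R-DME-6799198; Complex I biogenesis.
--             if annotation.startswith("R-"):  # R-DME-6799198 --> DME-6799198
--                 annotation = annotation[2:]
--             Reactome.append(annotation)
--         # elif func_type == "STRING":
--         #     funcs_2_return = []
--         #     try:
--         #         for func in [func.strip() for func in row_split[1:]]:
--         #             if func.endswith("."):
--         #                 func = func[:-1]
--         #             if func == "-":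
--         #                 continue
--         #             funcs_2_return.append(func)
--         #     except IndexError:
--         #         continue
--         #     STRING += funcs_2_return
--         # elif func_type == "Proteomes":
--         #     Proteomes.append(annotation)
--     # return [GO, InterPro, Pfam, KEGG, Reactome, STRING, Proteomes]
--     return GO, InterPro, Pfam, Reactome
-- ===== SOURCE B (Python) =====
-- def _annotations(list_of_string, wanted_type):
--     # one filtered pass extracting the stripped annotations of a single category
--     out = []
--     for row in list_of_string:
--         parts = row.split(";")
--         if parts[0] == wanted_type and len(parts) > 1:
--             out.append(parts[1].strip())
--     return out
--
--
-- def helper_parse_UniProt_dump_other_functions(list_of_string):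
--     # Four independent filtering passes, one per category, instead of one
--     # accumulating pass with an if/elif dispatch.
--     return (_annotations(list_of_string, "GO"),
--             _annotations(list_of_string, "InterPro"),
--             _annotations(list_of_string, "Pfam"),
--             [a[2:] if a.startswith("R-") else a
--              for a in _annotations(list_of_string, "Reactome")])
-- ===== Notes on version B (the rewrite author's own statement) =====
-- stated objective: alternative
-- what changed: Replaces A's single pass with per-category if/elif dispatch and try/except by four independent filtering passes (one helper call per category), with the Reactome 'R-' prefix stripped in a separate post-pass comprehension; trades one combined loop for staged simple loops.
import Mathlib
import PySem

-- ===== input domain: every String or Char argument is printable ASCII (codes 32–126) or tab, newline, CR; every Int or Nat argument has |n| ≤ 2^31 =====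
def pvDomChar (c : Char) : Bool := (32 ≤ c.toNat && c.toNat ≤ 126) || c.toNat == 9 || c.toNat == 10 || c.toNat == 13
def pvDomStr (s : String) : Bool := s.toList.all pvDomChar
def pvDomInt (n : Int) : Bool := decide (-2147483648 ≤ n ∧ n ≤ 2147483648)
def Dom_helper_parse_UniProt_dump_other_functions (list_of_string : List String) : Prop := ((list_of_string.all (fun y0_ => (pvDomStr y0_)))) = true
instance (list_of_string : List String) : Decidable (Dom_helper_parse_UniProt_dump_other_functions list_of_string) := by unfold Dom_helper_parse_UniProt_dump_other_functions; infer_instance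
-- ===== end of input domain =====

-- B replaces A's single accumulating pass (if/elif dispatch + try/except) with four
-- independent filtering passes, one per category, plus a Reactome "R-"-stripping
-- post-pass; objective: alternative (same cost, staged decomposition).

-- ===== PORT A =====
-- row.split(";") (Str.split? is total for the non-empty separator ";")
def pvSplit (row : String) : List String := (PySem.Str.split? row ";").getD []

-- annotation[2:] when it starts with "R-", else unchanged (the Reactome rewrite)
def pvStripR (a : String) : String :=
  if PySem.Str.startswith a "R-" then PySem.Str.slice a (some 2) none else a

-- the body of A's for-loop, acting on the (GO, InterPro, Pfam, Reactome) state
def pvStepA (acc : List String × List String × List String × List String) (row : String) :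
    List String × List String × List String × List String :=
  let row_split := pvSplit row
  let func_type := PySem.List.pyGetD row_split 0 ""
  match PySem.List.pyGet? row_split 1 with
  | none => acc            -- IndexError → continue
  | some s =>
    let annotation := PySem.Str.strip s
    if func_type == "GO" then (acc.1 ++ [annotation], acc.2.1, acc.2.2.1, acc.2.2.2)
    else if func_type == "InterPro" then (acc.1, acc.2.1 ++ [annotation], acc.2.2.1, acc.2.2.2)
    else if func_type == "Pfam" then (acc.1, acc.2.1, acc.2.2.1 ++ [annotation], acc.2.2.2)
    else if func_type == "Reactome" then (acc.1, acc.2.1, acc.2.2.1, acc.2.2.2 ++ [pvStripR annotation])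
    else acc

def helper_parse_UniProt_dump_other_functions (list_of_string : List String) :
    List String × List String × List String × List String :=
  list_of_string.foldl pvStepA ([], [], [], [])

-- ===== PORT B =====
-- body of _annotations' loop: append parts[1].strip() when parts[0]==t and len(parts)>1
def pvStepAnn (t : String) (out : List String) (row : String) : List String :=
  let parts := pvSplit row
  if PySem.List.pyGetD parts 0 "" == t && decide (1 < parts.length) then
    out ++ [PySem.Str.strip (PySem.List.pyGetD parts 1 "")]
  else out

-- _annotations(list_of_string, t)
def pvAnnotations (list_of_string : List String) (t : String) : List String :=
  list_of_string.foldl (pvStepAnn t) []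

def helper_parse_UniProt_dump_other_functions_alt (list_of_string : List String) :
    List String × List String × List String × List String :=
  (pvAnnotations list_of_string "GO",
   pvAnnotations list_of_string "InterPro",
   pvAnnotations list_of_string "Pfam",
   (pvAnnotations list_of_string "Reactome").map pvStripR)

-- ===== PRECONDITION & SPEC =====
def Spec_helper_parse_UniProt_dump_other_functions (list_of_string : List String) (out : List String × List String × List String × List String) : Prop := out = helper_parse_UniProt_dump_other_functions_alt list_of_string
instance (list_of_string : List String) (out : List String × List String × List String × List String) : Decidable (Spec_helper_parse_UniProt_dump_other_functions list_of_string out) := by unfold Spec_helper_parse_UniProt_dump_other_functions; infer_instance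

-- ===== CLAIM (what is proved, stated in full; the proofs are below) =====
def Claim_equal_helper_parse_UniProt_dump_other_functions : Prop := ∀ (list_of_string : List String), Dom_helper_parse_UniProt_dump_other_functions list_of_string → Spec_helper_parse_UniProt_dump_other_functions list_of_string (helper_parse_UniProt_dump_other_functions list_of_string)

-- ===== LEMMAS AND PROOFS =====

-- one step of B's loop appends a (possibly empty) suffix to its accumulator
lemma pvStepAnn_eq (t : String) (out : List String) (row : String) :
    pvStepAnn t out row = out ++ pvStepAnn t [] row := by
  unfold pvStepAnn; dsimp only; split <;> simp

-- B's loop is accumulator-homomorphic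
lemma pvFoldAnn_acc (t : String) (l : List String) (acc : List String) :
    l.foldl (pvStepAnn t) acc = acc ++ l.foldl (pvStepAnn t) [] := by
  induction l generalizing acc with
  | nil => simp
  | cons row tl ih =>
    simp only [List.foldl_cons]
    rw [ih, ih (pvStepAnn t [] row), pvStepAnn_eq]
    simp

-- one step of A equals the per-category steps of B glued back together
lemma pvStepA_eq (acc : List String × List String × List String × List String) (row : String) :
    pvStepA acc row =
      (acc.1 ++ pvStepAnn "GO" [] row,
       acc.2.1 ++ pvStepAnn "InterPro" [] row,
       acc.2.2.1 ++ pvStepAnn "Pfam" [] row,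
       acc.2.2.2 ++ (pvStepAnn "Reactome" [] row).map pvStripR) := by
  unfold pvStepA pvStepAnn
  cases h : pvSplit row with
  | nil => simp [PySem.List.pyGet?, PySem.List.pyIdx?]
  | cons a tl =>
    cases tl with
    | nil => simp [PySem.List.pyGet?, PySem.List.pyIdx?, PySem.List.pyGetD_zero]
    | cons b rest =>
      have h2 : PySem.List.pyGet? (a :: b :: rest) (1 : Int) = some b := by
        simp [PySem.List.pyGet?, PySem.List.pyIdx?]
      have h0 : PySem.List.pyGetD (a :: b :: rest) (0 : Int) "" = a :=
        PySem.List.pyGetD_zero ..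
      have h1 : PySem.List.pyGetD (a :: b :: rest) (1 : Int) "" = b := by
        simp [PySem.List.pyGetD, PySem.List.pyGet?, PySem.List.pyIdx?]
      simp only [h2, h0, h1, List.length_cons]
      by_cases hGO : a = "GO"
      · simp [hGO]
      · by_cases hIP : a = "InterPro"
        · simp [hIP]
        · by_cases hPf : a = "Pfam"
          · simp [hPf]
          · by_cases hRe : a = "Reactome"
            · simp [hRe]
            · simp [hGO, hIP, hPf, hRe]

-- A's whole fold equals B's four staged folds, for any starting state
lemma pvFoldA_eq (l : List String) (g i p r : List String) :
    l.foldl pvStepA (g, i, p, r) =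
      (g ++ pvAnnotations l "GO",
       i ++ pvAnnotations l "InterPro",
       p ++ pvAnnotations l "Pfam",
       r ++ (pvAnnotations l "Reactome").map pvStripR) := by
  induction l generalizing g i p r with
  | nil => simp [pvAnnotations]
  | cons row tl ih =>
    simp only [List.foldl_cons, pvStepA_eq]
    rw [ih]
    unfold pvAnnotations
    simp only [List.foldl_cons]
    rw [pvFoldAnn_acc "GO" tl (pvStepAnn "GO" [] row),
        pvFoldAnn_acc "InterPro" tl (pvStepAnn "InterPro" [] row),
        pvFoldAnn_acc "Pfam" tl (pvStepAnn "Pfam" [] row),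
        pvFoldAnn_acc "Reactome" tl (pvStepAnn "Reactome" [] row)]
    simp

-- ===== VERDICT (by name: the statement is the Claim_ definition above) =====
theorem helper_parse_UniProt_dump_other_functions_spec : Claim_equal_helper_parse_UniProt_dump_other_functions := by
  intro l _
  show _ = _
  unfold helper_parse_UniProt_dump_other_functions helper_parse_UniProt_dump_other_functions_alt
  rw [pvFoldA_eq]
  simp
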